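-- pv_equiv track=rewrite | github.com/amberdawn84ac-bot/dearadeline-withlove | adeline-brain/app/protocols/content_filter.py | should_return_document
-- ===== SOURCE A (Python) =====
-- from typing import Dict, Optional
--
-- SENSITIVE_KEYWORDS = {
--     # Justice track (power capture, surveillance, human rights violations)
--     "cointelpro": 14,  # FBI surveillance of civil rights groups → ages 14+
--     "assassination": 15,  # Political/state assassination plots → ages 15+
--     "torture": 15,  # Enhanced interrogation / torture → ages 15+
--     "surveillance": 13,  # Government surveillance (lower threshold for awareness) → ages 13+
--
--     # Health track (sensitive medical content)
--     "abortion": 14,  # Reproductive health decisions → ages 14+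
--     "euthanasia": 15,  # End-of-life decisions → ages 15+
--     "substance_abuse": 13,  # Drug/alcohol addiction → ages 13+
--
--     # Other sensitive topics
--     "sexual_abuse": 15,  # Child exploitation, sexual assault → ages 15+
--     "genocide": 14,  # Mass atrocities → ages 14+
--     "war_crimes": 14,  # International humanitarian law violations → ages 14+
-- }
--
-- def should_return_document(
--     document: Dict,
--     student_age: Optional[int] = None,
-- ) -> bool:
--     """
--     Determine if a document should be returned to a student based on age.
--
--     Implements age-gating for sensitive topics. If student_age is None,
--     no filtering is applied (assumes no age restriction needed).
--
--     Args:
--         document: Dictionary with 'source_title' and 'chunk' fields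
--         student_age: Student's age in years (None = no filtering)
--
--     Returns:
--         True if document should be returned, False if filtered
--
--     Example:
--         doc = {"source_title": "COINTELPRO", "chunk": "..."}
--         should_return_document(doc, student_age=10)  # False
--         should_return_document(doc, student_age=16)  # True
--         should_return_document(doc, student_age=None) # True (no filtering)
--     """
--     # If no age specified, don't filter (assume adult access)
--     if student_age is None:
--         return True
--
--     # Combine title and chunk for keyword matching
--     text_to_search = (
--         (document.get("source_title", "") or "") + " " +
--         (document.get("chunk", "") or "")
--     ).lower()
--
--     # Check for sensitive keywords
--     for keyword, min_age in SENSITIVE_KEYWORDS.items():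
--         if keyword in text_to_search:
--             # If student is below minimum age for this keyword, filter it
--             if student_age < min_age:
--                 return False
--
--     # No sensitive keywords found, or student is old enough
--     return True
-- ===== SOURCE B (Python) =====
-- SENSITIVE_KEYWORDS = {
--     "cointelpro": 14,
--     "assassination": 15,
--     "torture": 15,
--     "surveillance": 13,
--     "abortion": 14,
--     "euthanasia": 15,
--     "substance_abuse": 13,
--     "sexual_abuse": 15,
--     "genocide": 14,
--     "war_crimes": 14,
-- }
--
-- def should_return_document(document, student_age=None):
--     if student_age is None:
--         return True
--     text = (
--         (document.get("source_title", "") or "") + " " +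
--         (document.get("chunk", "") or "")
--     ).lower()
--     # text-driven scan: walk every offset of the text and ask whether a keyword
--     # too mature for this student starts right here
--     for i in range(len(text)):
--         for keyword, min_age in SENSITIVE_KEYWORDS.items():
--             if student_age < min_age and text.startswith(keyword, i):
--                 return False
--     return True
-- ===== Notes on version B (the rewrite author's own statement) =====
-- stated objective: alternative
-- what changed: B inverts the traversal: instead of A's keyword-driven loop running a substring search ('in') per keyword, B scans the text position by position and at each offset tests with startswith whether any keyword below the student's age begins there.
import Mathlib
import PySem

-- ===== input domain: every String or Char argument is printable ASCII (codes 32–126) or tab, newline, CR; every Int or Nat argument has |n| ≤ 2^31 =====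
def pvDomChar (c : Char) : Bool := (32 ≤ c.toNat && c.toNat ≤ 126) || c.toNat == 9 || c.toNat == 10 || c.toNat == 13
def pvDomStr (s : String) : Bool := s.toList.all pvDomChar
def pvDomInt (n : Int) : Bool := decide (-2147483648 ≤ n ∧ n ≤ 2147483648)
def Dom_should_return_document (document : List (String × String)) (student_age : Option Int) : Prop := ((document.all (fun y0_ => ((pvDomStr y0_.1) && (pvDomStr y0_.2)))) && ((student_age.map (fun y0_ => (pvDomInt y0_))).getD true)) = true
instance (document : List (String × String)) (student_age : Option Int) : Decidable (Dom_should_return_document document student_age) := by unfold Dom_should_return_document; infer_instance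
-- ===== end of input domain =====

-- B inverts the traversal (alternative decomposition, same cost): A loops over the keyword
-- table running a substring search per keyword; B scans the text offset by offset, testing at
-- each position whether a keyword too mature for the student starts there.

-- shared module constant SENSITIVE_KEYWORDS (insertion order of the Python dict)
def pvSensitiveKeywords : List (String × Int) :=
  [("cointelpro", 14), ("assassination", 15), ("torture", 15), ("surveillance", 13),
   ("abortion", 14), ("euthanasia", 15), ("substance_abuse", 13),
   ("sexual_abuse", 15), ("genocide", 14), ("war_crimes", 14)]

-- text building shared by both Pythons, ported on List Char (string '+' = list append; exact);
-- Python's `s or ""` on a str is the identity (returns "" when s = "") and is ported as such.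
def pvBuildText (document : List (String × String)) : List Char :=
  PySem.Chars.lower
    (((PySem.Dict.mk document).getD "source_title" "").toList ++
     (' ' :: ((PySem.Dict.mk document).getD "chunk" "").toList))

-- ===== PORT A =====
-- A's for-loop over the keyword dict, early-returning False
def pvALoop (text : List Char) (student_age : Int) : List (String × Int) → Bool
  | [] => true
  | (keyword, min_age) :: rest =>
      if PySem.Chars.isIn keyword.toList text then
        if student_age < min_age then false
        else pvALoop text student_age rest
      else pvALoop text student_age rest

def should_return_document (document : List (String × String)) (student_age : Option Int) : Bool :=
  match student_age with
  | none => true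
  | some age => pvALoop (pvBuildText document) age pvSensitiveKeywords

-- ===== PORT B =====
-- Source B's outer loop 'for i in range(len(text))' as structural recursion over the suffix
-- text[i:]; 'text.startswith(keyword, i)' (i ≥ 0) is exactly startswith on that suffix;
-- the inner for-loop with early return is List.any over the keyword table.
def pvBScan (age : Int) : List Char → Bool
  | [] => true
  | c :: rest =>
      if pvSensitiveKeywords.any
          (fun p => decide (age < p.2) && PySem.Chars.startswith (c :: rest) p.1.toList) then
        false
      else pvBScan age rest

def should_return_document_alt (document : List (String × String)) (student_age : Option Int) : Bool :=
  match student_age with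
  | none => true
  | some age => pvBScan age (pvBuildText document)

-- ===== PRECONDITION & SPEC =====
def Spec_should_return_document (document : List (String × String)) (student_age : Option Int) (out : Bool) : Prop := out = should_return_document_alt document student_age
instance (document : List (String × String)) (student_age : Option Int) (out : Bool) : Decidable (Spec_should_return_document document student_age out) := by unfold Spec_should_return_document; infer_instance

-- ===== CLAIM (what is proved, stated in full; the proofs are below) =====
def Claim_equal_should_return_document : Prop := ∀ (document : List (String × String)) (student_age : Option Int), Dom_should_return_document document student_age → Spec_should_return_document document student_age (should_return_document document student_age)

-- ===== LEMMAS AND PROOFS =====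

-- characterisation of A's loop: true iff every keyword present in the text is age-appropriate
theorem pvALoop_eq_decide (text : List Char) (age : Int) (kws : List (String × Int)) :
    pvALoop text age kws =
      decide (∀ p ∈ kws, PySem.Chars.isIn p.1.toList text = true → age ≥ p.2) := by
  induction kws with
  | nil => simp [pvALoop]
  | cons p rest ih =>
    obtain ⟨k, m⟩ := p
    by_cases h : PySem.Chars.isIn k.toList text = true
    · by_cases hlt : age < m
      · have hno : ¬ (∀ p ∈ (k, m) :: rest,
            PySem.Chars.isIn p.1.toList text = true → age ≥ p.2) := fun hall =>
          absurd (hall (k, m) (List.mem_cons_self) h) (by omega)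
        simp [pvALoop, h, hlt, decide_eq_false hno]
      · have hiff : (∀ p ∈ rest, PySem.Chars.isIn p.1.toList text = true → age ≥ p.2) ↔
            (∀ p ∈ (k, m) :: rest, PySem.Chars.isIn p.1.toList text = true → age ≥ p.2) := by
          constructor
          · intro hall p hp
            rcases List.mem_cons.mp hp with rfl | hp'
            · intro _; omega
            · exact hall p hp'
          · intro hall p hp
            exact hall p (List.mem_cons_of_mem _ hp)
        simp only [pvALoop, h, if_true, hlt, if_false, ih, decide_eq_decide]
        exact hiff
    · have h' : PySem.Chars.isIn k.toList text = false := eq_false_of_ne_true h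
      simp [pvALoop, h', ih]

-- every keyword in the table is a nonempty string
theorem pvKeywords_ne_nil : ∀ p ∈ pvSensitiveKeywords, p.1.toList ≠ [] := by decide

-- characterisation of B's scan: true iff no too-mature keyword is a prefix of any suffix
theorem pvBScan_iff (age : Int) (t : List Char) :
    pvBScan age t = true ↔
      ∀ p ∈ pvSensitiveKeywords, (∃ j, p.1.toList <+: t.drop j) → age ≥ p.2 := by
  induction t with
  | nil =>
    simp only [pvBScan]
    constructor
    · intro _ p hp ⟨j, hpref⟩
      exact absurd (List.prefix_nil.mp (by simpa using hpref)) (pvKeywords_ne_nil p hp)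
    · intro _; trivial
  | cons c rest ih =>
    by_cases hany : pvSensitiveKeywords.any
        (fun p => decide (age < p.2) && PySem.Chars.startswith (c :: rest) p.1.toList) = true
    · obtain ⟨p, hp, hcond⟩ := List.any_eq_true.mp hany
      obtain ⟨hlt, hpref⟩ := Bool.and_eq_true_iff.mp hcond
      have hpref' : p.1.toList <+: (c :: rest) := (PySem.Chars.startswith_iff _ _).mp hpref
      simp only [pvBScan, hany, if_true]
      constructor
      · intro h; exact absurd h (by simp)
      · intro hall
        have := hall p hp ⟨0, by simpa using hpref'⟩
        have := of_decide_eq_true hlt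
        omega
    · have hnone : ∀ p ∈ pvSensitiveKeywords,
          age < p.2 → ¬ p.1.toList <+: (c :: rest) := by
        intro p hp hlt hpref
        exact hany (List.any_eq_true.mpr ⟨p, hp,
          Bool.and_eq_true_iff.mpr ⟨decide_eq_true hlt, (PySem.Chars.startswith_iff _ _).mpr hpref⟩⟩)
      simp only [pvBScan, hany, Bool.false_eq_true, if_neg, not_false_iff, ih]
      constructor
      · intro hall p hp ⟨j, hpref⟩
        match j with
        | 0 =>
          by_contra hage
          exact hnone p hp (by omega) (by simpa using hpref)
        | Nat.succ j' =>
          exact hall p hp ⟨j', by simpa using hpref⟩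
      · intro hall p hp ⟨j, hpref⟩
        exact hall p hp ⟨j + 1, by simpa using hpref⟩

-- ===== VERDICT (by name: the statement is the Claim_ definition above) =====
theorem should_return_document_spec : Claim_equal_should_return_document := by
  intro document student_age _
  unfold Spec_should_return_document should_return_document should_return_document_alt
  cases student_age with
  | none => rfl
  | some age =>
    apply Bool.eq_iff_iff.mpr
    simp only []
    rw [pvALoop_eq_decide, pvBScan_iff, decide_eq_true_iff]
    constructor
    · intro h p hp hex
      exact h p hp ((PySem.Chars.exists_prefix_drop_iff_isIn _ _).mp hex)
    · intro h p hp hin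
      exact h p hp ((PySem.Chars.exists_prefix_drop_iff_isIn _ _).mpr hin)
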